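-- pv_equiv track=rewrite | github.com/BSC-CNS-EAPM/Mon-MHC | Mon-MHC/clustering_tools.py | getCommonPositions
-- ===== SOURCE A (Python) =====
-- def getCommonPositions(sequence1, sequence2, mode='exact'):
--     positions = []
--     # Initialize idependent counters for sequence positions
--     s1p = 0
--     s2p = 0
--     # Iterate thorugh the aligned positions
--     for i in range(len(sequence1)):
--         # Compare sequences according to selected mode
--         if sequence1[i] != '-' and sequence2[i] != '-':
--             if mode == 'exact':
--                 if sequence1[i] == sequence2[i]:
--                     positions.append((s1p, s2p))
--             elif mode == 'aligned':
--                 positions.append((s1p, s2p))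
--         # Add to position counters
--         if sequence1[i] != '-':
--             s1p += 1
--         if sequence2[i] != '-':
--             s2p += 1
--
--     return positions
-- ===== SOURCE B (Python) =====
-- def _prefix_nongap(seq):
--     # cum[i] = number of non-gap characters in seq[:i]
--     cum = [0]
--     n = 0
--     for c in seq:
--         if c != '-':
--             n += 1
--         cum.append(n)
--     return cum
--
--
-- def getCommonPositions(sequence1, sequence2, mode='exact'):
--     cum1 = _prefix_nongap(sequence1)
--     cum2 = _prefix_nongap(sequence2)
--     out = []
--     for i in range(len(sequence1)):
--         if sequence1[i] != '-' and sequence2[i] != '-':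
--             if mode == 'aligned' or (mode == 'exact' and sequence1[i] == sequence2[i]):
--                 out.append((cum1[i], cum2[i]))
--     return out
-- ===== Notes on version B (the rewrite author's own statement) =====
-- stated objective: alternative
-- what changed: Replaces the two running position counters threaded through the scan by two precomputed prefix non-gap-count tables, so the main loop is a pure filter that looks positions up instead of maintaining state.
import Mathlib
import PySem

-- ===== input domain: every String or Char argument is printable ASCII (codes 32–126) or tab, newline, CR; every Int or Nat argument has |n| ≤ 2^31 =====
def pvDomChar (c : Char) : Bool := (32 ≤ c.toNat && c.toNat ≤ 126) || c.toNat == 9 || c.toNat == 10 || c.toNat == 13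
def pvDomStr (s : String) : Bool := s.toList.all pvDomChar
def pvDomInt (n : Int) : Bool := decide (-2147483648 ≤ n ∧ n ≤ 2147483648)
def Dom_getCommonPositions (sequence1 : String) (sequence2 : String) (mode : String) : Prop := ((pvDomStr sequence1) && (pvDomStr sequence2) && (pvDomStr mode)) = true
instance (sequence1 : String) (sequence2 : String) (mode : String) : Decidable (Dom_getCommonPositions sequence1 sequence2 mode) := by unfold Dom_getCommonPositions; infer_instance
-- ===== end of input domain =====

-- B replaces A's two running position counters by precomputed prefix non-gap-count
-- tables looked up from a stateless filter loop (objective: alternative decomposition, same O(n) cost).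
-- Pre_ excludes len(sequence2) < len(sequence1), where Python A raises IndexError.

-- ===== PORT A =====
-- A's loop body, named so proofs stay readable; indexing uses List.getD — under
-- Pre_ every accessed index is in range, so the default char is never read
-- (Python raises exactly on the inputs Pre_ excludes).
def pvStepA (l1 l2 : List Char) (mode : String)
    (st : List (Int × Int) × Int × Int) (i : Nat) : List (Int × Int) × Int × Int :=
  let c1 := l1.getD i ' '
  let c2 := l2.getD i ' '
  let positions :=
    if c1 ≠ '-' ∧ c2 ≠ '-' then
      if mode = "exact" then
        (if c1 = c2 then st.1 ++ [(st.2.1, st.2.2)] else st.1)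
      else if mode = "aligned" then st.1 ++ [(st.2.1, st.2.2)]
      else st.1
    else st.1
  let s1p := if c1 ≠ '-' then st.2.1 + 1 else st.2.1
  let s2p := if c2 ≠ '-' then st.2.2 + 1 else st.2.2
  (positions, s1p, s2p)

def getCommonPositions (sequence1 : String) (sequence2 : String) (mode : String) : List (Int × Int) :=
  ((List.range sequence1.toList.length).foldl
      (pvStepA sequence1.toList sequence2.toList mode) ([], 0, 0)).1

-- ===== PORT B =====
-- port of Source B's _prefix_nongap loop (running count n, one entry per char);
-- Source B's cum list is 0 :: pvPrefixNongap 0 chars.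
def pvPrefixNongap (n : Int) : List Char → List Int
  | [] => []
  | c :: rest =>
    let n' := if c ≠ '-' then n + 1 else n
    n' :: pvPrefixNongap n' rest

-- B's loop body: a pure filter that reads positions from the prefix tables.
def pvStepB (l1 l2 : List Char) (mode : String) (cum1 cum2 : List Int)
    (out : List (Int × Int)) (i : Nat) : List (Int × Int) :=
  let c1 := l1.getD i ' '
  let c2 := l2.getD i ' '
  if c1 ≠ '-' ∧ c2 ≠ '-' then
    if mode = "aligned" ∨ (mode = "exact" ∧ c1 = c2) then
      out ++ [(cum1.getD i 0, cum2.getD i 0)]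
    else out
  else out

def getCommonPositions_alt (sequence1 : String) (sequence2 : String) (mode : String) : List (Int × Int) :=
  let l1 := sequence1.toList
  let l2 := sequence2.toList
  let cum1 := (0 : Int) :: pvPrefixNongap 0 l1
  let cum2 := (0 : Int) :: pvPrefixNongap 0 l2
  (List.range l1.length).foldl (pvStepB l1 l2 mode cum1 cum2) []

-- ===== PRECONDITION & SPEC =====
-- Pre_ excludes exactly the inputs where Python A raises IndexError: sequence2 shorter than sequence1.
def Pre_getCommonPositions (sequence1 : String) (sequence2 : String) (mode : String) : Prop :=
  sequence1.toList.length ≤ sequence2.toList.length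
instance (sequence1 : String) (sequence2 : String) (mode : String) : Decidable (Pre_getCommonPositions sequence1 sequence2 mode) := by unfold Pre_getCommonPositions; infer_instance
def pvWitness_getCommonPositions : String × String × String := ("AB-C", "A-BC", "exact")

def Spec_getCommonPositions (sequence1 : String) (sequence2 : String) (mode : String) (out : List (Int × Int)) : Prop := out = getCommonPositions_alt sequence1 sequence2 mode
instance (sequence1 : String) (sequence2 : String) (mode : String) (out : List (Int × Int)) : Decidable (Spec_getCommonPositions sequence1 sequence2 mode out) := by unfold Spec_getCommonPositions; infer_instance

-- ===== CLAIM (what is proved, stated in full; the proofs are below) =====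
def Claim_equal_getCommonPositions : Prop := ∀ (sequence1 : String) (sequence2 : String) (mode : String), Dom_getCommonPositions sequence1 sequence2 mode → Pre_getCommonPositions sequence1 sequence2 mode → Spec_getCommonPositions sequence1 sequence2 mode (getCommonPositions sequence1 sequence2 mode)

-- ===== LEMMAS AND PROOFS =====

-- number of non-gap chars, as Int (the value both programs track)
def pvCnt (l : List Char) : Int := (l.countP (fun c => c ≠ '-') : Int)

theorem pvCnt_take_succ (l : List Char) (k : Nat) (hk : k < l.length) :
    pvCnt (l.take (k + 1)) = pvCnt (l.take k) + (if l.getD k ' ' ≠ '-' then 1 else 0) := by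
  have h1 : l[k]? = some l[k] := List.getElem?_eq_getElem hk
  have h2 : l.getD k ' ' = l[k] := by simp [List.getD, h1]
  rw [List.take_add_one, h1]
  simp only [pvCnt, Option.toList_some, List.countP_append, List.countP_cons,
    List.countP_nil, h2]
  split_ifs <;> simp_all

-- entry k of B's prefix table (n :: pvPrefixNongap n l) is n + non-gap count of l.take k
theorem pvPrefixNongap_getD (l : List Char) (n : Int) (k : Nat) (hk : k ≤ l.length) :
    ((n :: pvPrefixNongap n l).getD k 0) = n + pvCnt (l.take k) := by
  induction l generalizing n k with
  | nil =>
    have hk0 : k = 0 := by simpa using hk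
    subst hk0; simp [pvCnt]
  | cons c rest ih =>
    cases k with
    | zero => simp [pvCnt]
    | succ k =>
      have hk' : k ≤ rest.length := by simpa using hk
      simp only [pvPrefixNongap, List.getD_cons_succ]
      rw [ih (n := if c ≠ '-' then n + 1 else n) (k := k) hk']
      simp [pvCnt]
      split_ifs <;> simp_all <;> ring

-- one step of A, started from (B's list, the two prefix counts), is one step of B plus updated counts
theorem pvStep_eq (l1 l2 : List Char) (mode : String) (out : List (Int × Int))
    (n : Nat) (h1 : n < l1.length) (h2 : n < l2.length) :
    pvStepA l1 l2 mode (out, pvCnt (l1.take n), pvCnt (l2.take n)) n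
      = (pvStepB l1 l2 mode ((0 : Int) :: pvPrefixNongap 0 l1)
            ((0 : Int) :: pvPrefixNongap 0 l2) out n,
         pvCnt (l1.take (n + 1)), pvCnt (l2.take (n + 1))) := by
  unfold pvStepA pvStepB
  rw [pvPrefixNongap_getD l1 0 n h1.le, pvPrefixNongap_getD l2 0 n h2.le,
      pvCnt_take_succ l1 n h1, pvCnt_take_succ l2 n h2]
  by_cases hg1 : l1.getD n ' ' = '-' <;> by_cases hg2 : l2.getD n ' ' = '-' <;>
    by_cases he : mode = "exact" <;> by_cases ha : mode = "aligned" <;>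
    by_cases hc : l1.getD n ' ' = l2.getD n ' ' <;>
    simp_all

-- loop invariant: after indices 0..n-1, A's state is (B's list so far, the two prefix counts)
theorem pvLoop_eq (l1 l2 : List Char) (mode : String) (hlen : l1.length ≤ l2.length)
    (n : Nat) (hn : n ≤ l1.length) :
    (List.range n).foldl (pvStepA l1 l2 mode) ([], 0, 0)
      = ((List.range n).foldl
           (pvStepB l1 l2 mode ((0 : Int) :: pvPrefixNongap 0 l1)
             ((0 : Int) :: pvPrefixNongap 0 l2)) [],
         pvCnt (l1.take n), pvCnt (l2.take n)) := by
  induction n with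
  | zero => simp [pvCnt]
  | succ n ih =>
    have hn' : n ≤ l1.length := Nat.le_of_succ_le hn
    rw [List.range_succ, List.foldl_append, List.foldl_append, ih hn']
    simp only [List.foldl_cons, List.foldl_nil]
    exact pvStep_eq l1 l2 mode _ n hn (lt_of_lt_of_le hn hlen)

-- ===== VERDICT (by name: the statement is the Claim_ definition above) =====
theorem getCommonPositions_spec : Claim_equal_getCommonPositions := by
  intro s1 s2 mode _ hpre
  unfold Spec_getCommonPositions getCommonPositions getCommonPositions_alt
  rw [pvLoop_eq s1.toList s2.toList mode hpre s1.toList.length le_rfl]
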